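-- pv_equiv track=rewrite | github.com/niharshah/AIScientistPitfalls | AI Scientist v2/generated_research/MetricMisuse/shape-flip/shape first/trash/SWA only/logs/0-run/experiment_results/experiment_61aff25d7cf84e54ad4dfb8f0737b2ce_proc_2602726/experiment_code.py | signatures
-- ===== SOURCE A (Python) =====
-- def signatures(seqs):
--     sig = []
--     for s in seqs:
--         sig.append(
--             (
--                 tuple(sorted(set(tok[0] for tok in s.split()))),
--                 tuple(sorted(set(tok[1] for tok in s.split()))),
--             )
--         )
--     return sig
-- ===== SOURCE B (Python) =====
-- def _insert(lst, x):
--     # insert x into the sorted duplicate-free list lst, keeping it sorted and duplicate-free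
--     i = 0
--     while i < len(lst) and lst[i] < x:
--         i += 1
--     if i == len(lst) or lst[i] != x:
--         lst.insert(i, x)
--
--
-- def _sig(s):
--     firsts, seconds = [], []
--     for tok in s.split():
--         _insert(firsts, tok[0])
--         _insert(seconds, tok[1])
--     return (tuple(firsts), tuple(seconds))
--
--
-- def signatures(seqs):
--     return [_sig(s) for s in seqs]
-- ===== Notes on version B (the rewrite author's own statement) =====
-- stated objective: alternative
-- what changed: B uses no set and no sort call: for each sequence it makes one pass over the tokens, inserting each first/second character into a sorted duplicate-free list at its ordered position, so the sorted unique tuples are ready when the pass ends.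
import Mathlib
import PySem

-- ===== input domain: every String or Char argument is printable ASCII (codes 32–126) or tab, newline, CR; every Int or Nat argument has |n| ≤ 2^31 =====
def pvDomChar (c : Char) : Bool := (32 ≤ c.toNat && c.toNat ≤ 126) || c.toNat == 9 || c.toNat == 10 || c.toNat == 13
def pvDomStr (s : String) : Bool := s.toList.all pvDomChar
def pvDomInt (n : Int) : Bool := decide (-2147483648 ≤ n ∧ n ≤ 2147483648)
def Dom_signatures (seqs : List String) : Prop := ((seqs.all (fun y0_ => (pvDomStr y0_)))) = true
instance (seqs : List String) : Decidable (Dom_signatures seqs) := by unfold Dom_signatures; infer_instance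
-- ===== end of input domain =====

-- ===== PORT A =====
-- B replaces A's per-sequence set building + sort call with one token pass that places each
-- character at its ordered position in a sorted duplicate-free list (objective: alternative).
-- tok[i]: one-character string; 'none' = IndexError, excluded by Pre_ (the "" default is never reached under Pre_)
def pvChar1 (tok : String) (i : Int) : String :=
  match PySem.List.pyGet? tok.toList i with
  | some c => String.ofList [c]
  | none => ""

def signatures (seqs : List String) : List (List String × List String) :=
  seqs.foldl (fun sig s =>
    sig ++ [((PySem.List.sorted (PySem.Set.ofList ((PySem.Str.split₀ s).map (fun tok => pvChar1 tok 0))) (fun x => x) false),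
             (PySem.List.sorted (PySem.Set.ofList ((PySem.Str.split₀ s).map (fun tok => pvChar1 tok 1))) (fun x => x) false))]) []

-- ===== PORT B =====
-- _insert: walk past the elements below x; insert x there unless it is already present
def pvInsSorted (x : String) : List String → List String
  | [] => [x]
  | y :: ys => if y < x then y :: pvInsSorted x ys
               else if y == x then y :: ys
               else x :: y :: ys

def pvSigOne (s : String) : List String × List String :=
  let fs := (PySem.Str.split₀ s).foldl
      (fun (acc : List String × List String) tok =>
        (pvInsSorted (pvChar1 tok 0) acc.1, pvInsSorted (pvChar1 tok 1) acc.2))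
      ([], [])
  (fs.1, fs.2)

def signatures_alt (seqs : List String) : List (List String × List String) :=
  seqs.map pvSigOne

-- ===== PRECONDITION & SPEC =====
-- Pre_ excludes inputs where some whitespace-separated token has length < 2: there A (and B) raises IndexError on tok[1].
def Pre_signatures (seqs : List String) : Prop :=
  ∀ s ∈ seqs, ∀ tok ∈ PySem.Str.split₀ s, 2 ≤ tok.toList.length
instance (seqs : List String) : Decidable (Pre_signatures seqs) := by unfold Pre_signatures; infer_instance
def pvWitness_signatures : List String := ["ab cd ae", "xx y? zz", ""]
def Spec_signatures (seqs : List String) (out : List (List String × List String)) : Prop := out = signatures_alt seqs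
instance (seqs : List String) (out : List (List String × List String)) : Decidable (Spec_signatures seqs out) := by unfold Spec_signatures; infer_instance

-- ===== CLAIM (what is proved, stated in full; the proofs are below) =====
def Claim_equal_signatures : Prop := ∀ (seqs : List String), Dom_signatures seqs → Pre_signatures seqs → Spec_signatures seqs (signatures seqs)

-- ===== LEMMAS AND PROOFS =====
theorem pvMem_insSorted (x a : String) (l : List String) :
    a ∈ pvInsSorted x l ↔ a = x ∨ a ∈ l := by
  induction l with
  | nil => simp [pvInsSorted]
  | cons y ys ih =>
    simp only [pvInsSorted]
    split_ifs with h1 h2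
    · simp [ih]; tauto
    · have hyx : y = x := by simpa using h2
      subst hyx; simp
    · simp

theorem pvPairwise_insSorted (x : String) (l : List String)
    (h : l.Pairwise (· < ·)) : (pvInsSorted x l).Pairwise (· < ·) := by
  induction l with
  | nil => simp [pvInsSorted]
  | cons y ys ih =>
    rcases List.pairwise_cons.mp h with ⟨hy, hys⟩
    by_cases h1 : y < x
    · simp only [pvInsSorted, if_pos h1]
      refine List.pairwise_cons.mpr ⟨?_, ih hys⟩
      intro a ha
      rcases (pvMem_insSorted x a ys).mp ha with rfl | ha'
      · exact h1
      · exact hy a ha'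
    · by_cases h2 : y = x
      · simpa [pvInsSorted, h1, h2] using h
      · have hxy : x < y := lt_of_le_of_ne (not_lt.mp h1) (Ne.symm h2)
        have h2' : (y == x) = false := by simpa using h2
        simp only [pvInsSorted, if_neg h1, h2', Bool.false_eq_true, if_false]
        refine List.pairwise_cons.mpr ⟨?_, h⟩
        intro a ha
        rcases List.mem_cons.mp ha with rfl | ha'
        · exact hxy
        · exact lt_trans hxy (hy a ha')

-- the B-side fold over one sequence, written as a fold of pvInsSorted
theorem pvFoldIns_pairwise (cs : List String) (l : List String)
    (h : l.Pairwise (· < ·)) :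
    (cs.foldl (fun acc c => pvInsSorted c acc) l).Pairwise (· < ·) := by
  induction cs generalizing l with
  | nil => exact h
  | cons c cs ih => exact ih _ (pvPairwise_insSorted c l h)

theorem pvFoldIns_mem (cs : List String) (l : List String) (a : String) :
    a ∈ cs.foldl (fun acc c => pvInsSorted c acc) l ↔ a ∈ l ∨ a ∈ cs := by
  induction cs generalizing l with
  | nil => simp
  | cons c cs ih =>
    simp only [List.foldl_cons, ih, pvMem_insSorted, List.mem_cons]
    tauto

-- ordered insertion over a list of characters produces exactly sorted(set(cs))
theorem pvFoldIns_eq_sorted_set (cs : List String) :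
    cs.foldl (fun acc c => pvInsSorted c acc) []
      = PySem.List.sorted (PySem.Set.ofList cs) (fun x => x) false := by
  have hpw : (cs.foldl (fun acc c => pvInsSorted c acc) []).Pairwise (· < ·) :=
    pvFoldIns_pairwise cs [] (by simp)
  refine (PySem.List.sorted_eq_of_perm_of_pairwise_lt (PySem.Set.ofList cs) _ (fun x => x) ?_ hpw).symm
  refine (List.perm_ext_iff_of_nodup (List.Pairwise.nodup hpw) (PySem.Set.nodup_ofList cs)).mpr ?_
  intro a
  simp [pvFoldIns_mem, PySem.Set.mem_ofList]

-- B's single fold with a pair of lists computes the two folds separately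
theorem pvFold_pair (f g : String → String) (toks : List String)
    (a b : List String) :
    toks.foldl (fun (acc : List String × List String) tok =>
        (pvInsSorted (f tok) acc.1, pvInsSorted (g tok) acc.2)) (a, b)
      = ((toks.map f).foldl (fun acc c => pvInsSorted c acc) a,
         (toks.map g).foldl (fun acc c => pvInsSorted c acc) b) := by
  induction toks generalizing a b with
  | nil => rfl
  | cons t ts ih => simpa using ih (pvInsSorted (f t) a) (pvInsSorted (g t) b)

theorem pvSigOne_eq (s : String) :
    pvSigOne s
      = ((PySem.List.sorted (PySem.Set.ofList ((PySem.Str.split₀ s).map (fun tok => pvChar1 tok 0))) (fun x => x) false),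
         (PySem.List.sorted (PySem.Set.ofList ((PySem.Str.split₀ s).map (fun tok => pvChar1 tok 1))) (fun x => x) false)) := by
  unfold pvSigOne
  rw [pvFold_pair (fun tok => pvChar1 tok 0) (fun tok => pvChar1 tok 1) (PySem.Str.split₀ s) [] []]
  simp [pvFoldIns_eq_sorted_set]

-- ===== VERDICT (by name: the statement is the Claim_ definition above) =====
theorem signatures_spec : Claim_equal_signatures := by
  intro seqs _ _
  unfold Spec_signatures signatures signatures_alt
  rw [PySem.List.foldl_append_singleton_eq_map
        (fun s => ((PySem.List.sorted (PySem.Set.ofList ((PySem.Str.split₀ s).map (fun tok => pvChar1 tok 0))) (fun x => x) false),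
                   (PySem.List.sorted (PySem.Set.ofList ((PySem.Str.split₀ s).map (fun tok => pvChar1 tok 1))) (fun x => x) false))) seqs []]
  simp [pvSigOne_eq]
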